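-- pv_equiv track=rewrite | github.com/zehrahayirci/adventofcode2020 | advent_17.py | giveNeightbors
-- ===== SOURCE A (Python) =====
-- def giveNeightbors(x,y,z,w):
--     maxx = 26
--     neighborlar=[]
--     for i in [-1,0,1]:
--         for j in [-1,0,1]:
--             for k in [-1,0,1]:
--                 for l in [-1,0,1]:
--                     if i == 0 and  j == 0 and k == 0 and l == 0:
--                         continue
--                     komsu_x = x+i
--                     komsu_y = y+j
--                     komsu_z = z+k
--                     komsu_w = w+l
--                     if komsu_x < 0 or komsu_y < 0 or komsu_z < 0 or komsu_x > maxx or komsu_y > maxx \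
--                         or komsu_z > maxx or komsu_w > maxx or komsu_w < 0 :
--                         continue
--                     neighborlar.append([komsu_x,komsu_y,komsu_z,komsu_w])
--     return neighborlar
-- ===== SOURCE B (Python) =====
-- def giveNeightbors(x, y, z, w):
--     # Build the whole clamped 3x3x3x3 box by recursion on the coordinate list
--     # (per-axis interval [max(0,c-1), min(26,c+1)]), then delete the center cell
--     # if it lies inside the grid.
--     def box(coords):
--         if not coords:
--             return [[]]
--         c = coords[0]
--         tails = box(coords[1:])
--         return [[v] + t for v in range(max(0, c - 1), min(26, c + 1) + 1) for t in tails]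
--     center = [x, y, z, w]
--     cells = box(center)
--     if all(0 <= c <= 26 for c in center):
--         cells.remove(center)
--     return cells
-- ===== Notes on version B (the rewrite author's own statement) =====
-- stated objective: alternative
-- what changed: B replaces A's four nested offset loops with inline bounds-and-center checks by a dimension-generic recursion over the coordinate list that builds the whole clamped box from per-axis intervals [max(0,c-1), min(26,c+1)], then deletes the center cell afterwards (only when it lies inside the grid).
import Mathlib
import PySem

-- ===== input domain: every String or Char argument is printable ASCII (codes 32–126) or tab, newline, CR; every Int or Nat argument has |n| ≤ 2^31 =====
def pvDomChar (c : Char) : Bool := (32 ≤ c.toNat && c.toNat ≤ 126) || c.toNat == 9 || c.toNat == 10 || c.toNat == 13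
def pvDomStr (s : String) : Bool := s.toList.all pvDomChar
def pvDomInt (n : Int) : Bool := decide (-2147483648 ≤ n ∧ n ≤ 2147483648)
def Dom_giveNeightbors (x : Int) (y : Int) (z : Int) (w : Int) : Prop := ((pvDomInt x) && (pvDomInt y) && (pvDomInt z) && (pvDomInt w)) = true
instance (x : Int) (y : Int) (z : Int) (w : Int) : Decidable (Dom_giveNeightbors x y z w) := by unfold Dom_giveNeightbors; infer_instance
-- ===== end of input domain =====

-- B builds the whole clamped 3^4 box by a dimension-generic recursion over the coordinate
-- list (per-axis interval range) and then deletes the center cell, instead of A's four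
-- nested offset loops with an inline bounds-and-center check (objective: alternative).

-- ===== PORT A =====
-- Nested `for i/j/k/l in [-1,0,1]` loops with an accumulator, one foldl per loop level.
def pvA_loopL (x y z w i j k : Int) (acc : List (List Int)) : List (List Int) :=
  List.foldl (fun acc l =>
    if i = 0 ∧ j = 0 ∧ k = 0 ∧ l = 0 then acc
    else
      let kx := x + i
      let ky := y + j
      let kz := z + k
      let kw := w + l
      if kx < 0 ∨ ky < 0 ∨ kz < 0 ∨ kx > 26 ∨ ky > 26 ∨ kz > 26 ∨ kw > 26 ∨ kw < 0 then acc
      else acc ++ [[kx, ky, kz, kw]]) acc [-1, 0, 1]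

def pvA_loopK (x y z w i j : Int) (acc : List (List Int)) : List (List Int) :=
  List.foldl (fun acc k => pvA_loopL x y z w i j k acc) acc [-1, 0, 1]

def pvA_loopJ (x y z w i : Int) (acc : List (List Int)) : List (List Int) :=
  List.foldl (fun acc j => pvA_loopK x y z w i j acc) acc [-1, 0, 1]

def giveNeightbors (x : Int) (y : Int) (z : Int) (w : Int) : List (List Int) :=
  List.foldl (fun acc i => pvA_loopJ x y z w i acc) [] [-1, 0, 1]

-- ===== PORT B =====
-- `box(coords)`: recursion over the coordinate list; `range(max(0,c-1), min(26,c+1)+1)`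
-- is PySem.List.pyRange, `[v] + t` for the two comprehension levels is flatMap/map.
def pvBox : List Int → List (List Int)
  | [] => [[]]
  | c :: rest =>
    let tails := pvBox rest
    (PySem.List.pyRange (max 0 (c - 1)) (min 26 (c + 1) + 1) 1).flatMap
      (fun v => tails.map (fun t => v :: t))

-- `cells.remove(center)` is List.erase: the guard guarantees the center is present,
-- so Python's ValueError branch is unreachable and first-occurrence removal is exact.
def giveNeightbors_alt (x : Int) (y : Int) (z : Int) (w : Int) : List (List Int) :=
  let center : List Int := [x, y, z, w]
  let cells := pvBox center
  if center.all (fun c => decide (0 ≤ c ∧ c ≤ 26)) then cells.erase center else cells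

-- ===== PRECONDITION & SPEC =====
def Spec_giveNeightbors (x : Int) (y : Int) (z : Int) (w : Int) (out : List (List Int)) : Prop := out = giveNeightbors_alt x y z w
instance (x : Int) (y : Int) (z : Int) (w : Int) (out : List (List Int)) : Decidable (Spec_giveNeightbors x y z w out) := by unfold Spec_giveNeightbors; infer_instance

-- ===== CLAIM (what is proved, stated in full; the proofs are below) =====
def Claim_equal_giveNeightbors : Prop := ∀ (x : Int) (y : Int) (z : Int) (w : Int), Dom_giveNeightbors x y z w → Spec_giveNeightbors x y z w (giveNeightbors x y z w)

-- ===== LEMMAS AND PROOFS =====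

-- the per-axis valid coordinates, in filter form (proof-side normal form)
def pvValid (c : Int) : List Int :=
  [c - 1, c, c + 1].filter (fun v => decide (0 ≤ v ∧ v ≤ 26))

-- A's result, reshaped as a product over the per-axis valid lists with a center skip
def pvG (x y z w : Int) : List (List Int) :=
  (pvValid x).flatMap (fun kx =>
    (pvValid y).flatMap (fun ky =>
      (pvValid z).flatMap (fun kz =>
        (pvValid w).flatMap (fun kw =>
          if ([kx, ky, kz, kw] : List Int) ≠ [x, y, z, w] then [[kx, ky, kz, kw]] else []))))

-- a foldl that only ever appends to the accumulator is init ++ flatMap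
theorem pv_foldl_to_flatMap {α β : Type} (f : List α → β → List α) (g : β → List α)
    (h : ∀ acc b, f acc b = acc ++ g b) (l : List β) (init : List α) :
    List.foldl f init l = init ++ l.flatMap g := by
  induction l generalizing init with
  | nil => simp
  | cons a t ih => simp [List.foldl, h, ih, List.append_assoc]

theorem pv_flatMap_filter {α β : Type} (p : α → Bool) (l : List α) (f : α → List β) :
    (l.filter p).flatMap f = l.flatMap (fun a => if p a then f a else []) := by
  induction l with
  | nil => rfl
  | cons a t ih => by_cases h : p a <;> simp [h, ih]

theorem pv_filter_flatMap {α β : Type} (l : List α) (f : α → List β) (p : β → Bool) :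
    (l.flatMap f).filter p = l.flatMap (fun a => (f a).filter p) := by
  induction l with
  | nil => rfl
  | cons a t ih => simp [List.filter_append, ih]

-- ---- A-side: flatten the loop nest ----

def pvLeafA (x y z w i j k l : Int) : List (List Int) :=
  if i = 0 ∧ j = 0 ∧ k = 0 ∧ l = 0 then []
  else if x + i < 0 ∨ y + j < 0 ∨ z + k < 0 ∨ x + i > 26 ∨ y + j > 26 ∨ z + k > 26 ∨ w + l > 26 ∨ w + l < 0 then []
  else [[x + i, y + j, z + k, w + l]]

theorem pvA_loopL_eq (x y z w i j k : Int) (acc : List (List Int)) :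
    pvA_loopL x y z w i j k acc = acc ++ ([-1, 0, 1] : List Int).flatMap (pvLeafA x y z w i j k) := by
  refine pv_foldl_to_flatMap _ _ (fun acc l => ?_) _ _
  simp only [pvLeafA]
  split_ifs <;> simp

theorem pvA_loopK_eq (x y z w i j : Int) (acc : List (List Int)) :
    pvA_loopK x y z w i j acc
      = acc ++ ([-1, 0, 1] : List Int).flatMap (fun k => ([-1, 0, 1] : List Int).flatMap (pvLeafA x y z w i j k)) :=
  pv_foldl_to_flatMap _ _ (fun acc k => pvA_loopL_eq x y z w i j k acc) _ _

theorem pvA_loopJ_eq (x y z w i : Int) (acc : List (List Int)) :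
    pvA_loopJ x y z w i acc
      = acc ++ ([-1, 0, 1] : List Int).flatMap (fun j => ([-1, 0, 1] : List Int).flatMap (fun k => ([-1, 0, 1] : List Int).flatMap (pvLeafA x y z w i j k))) :=
  pv_foldl_to_flatMap _ _ (fun acc j => pvA_loopK_eq x y z w i j acc) _ _

theorem pvA_flat (x y z w : Int) :
    giveNeightbors x y z w
      = ([-1, 0, 1] : List Int).flatMap (fun i => ([-1, 0, 1] : List Int).flatMap (fun j => ([-1, 0, 1] : List Int).flatMap (fun k => ([-1, 0, 1] : List Int).flatMap (pvLeafA x y z w i j k)))) := by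
  have := pv_foldl_to_flatMap (fun acc i => pvA_loopJ x y z w i acc) _
    (fun acc i => pvA_loopJ_eq x y z w i acc) ([-1, 0, 1] : List Int) []
  simpa [giveNeightbors] using this

-- leaf of A rewritten in pvG's guard shape
theorem pvLeaf_eq (x y z w i j k : Int) :
    pvLeafA x y z w i j k
      = fun l => (if 0 ≤ x + i ∧ x + i ≤ 26 then
          if 0 ≤ y + j ∧ y + j ≤ 26 then
            if 0 ≤ z + k ∧ z + k ≤ 26 then
              if 0 ≤ w + l ∧ w + l ≤ 26 then
                (if ([x + i, y + j, z + k, w + l] : List Int) ≠ [x, y, z, w] then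
                  [[x + i, y + j, z + k, w + l]]
                else [])
              else []
            else []
          else []
        else []) := by
  funext l
  simp only [pvLeafA, ne_eq, List.cons.injEq, and_true]
  split_ifs <;> first | rfl | omega

-- pvG's per-axis list, consumed by a flatMap, is the [-1,0,1] loop with a per-step bounds guard
theorem pv_axis_flatMap (c : Int) (F : Int → List (List Int)) :
    (pvValid c).flatMap F
      = ([-1, 0, 1] : List Int).flatMap (fun i => if 0 ≤ c + i ∧ c + i ≤ 26 then F (c + i) else []) := by
  have h1 : c + (-1) = c - 1 := by ring
  simp [pvValid, pv_flatMap_filter, List.flatMap_cons, h1, decide_eq_true_eq]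

theorem pv_ite_flatMap (P : Prop) [Decidable P] (l : List Int) (f : Int → List (List Int)) :
    (if P then l.flatMap f else []) = l.flatMap (fun a => if P then f a else []) := by
  split_ifs <;> simp

theorem pvA_eq_pvG (x y z w : Int) : giveNeightbors x y z w = pvG x y z w := by
  rw [pvA_flat]
  simp only [pvG, pv_axis_flatMap, pv_ite_flatMap, pvLeaf_eq]

-- ---- B-side: the box's per-axis range is the valid-coordinate list ----

theorem pv_axis_range (c : Int) :
    PySem.List.pyRange (max 0 (c - 1)) (min 26 (c + 1) + 1) 1 = pvValid c := by
  unfold pvValid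
  by_cases h1 : c ≤ -2
  · rw [PySem.List.pyRange_one_eq_nil (by omega)]
    symm; rw [List.filter_eq_nil_iff]
    intro a ha; simp at ha ⊢; rcases ha with rfl | rfl | rfl <;> omega
  by_cases h2 : c = -1
  · subst h2; decide
  by_cases h3 : c = 0
  · subst h3; decide
  by_cases h4 : 1 ≤ c ∧ c ≤ 25
  · rw [show max 0 (c - 1) = c - 1 by omega, show min 26 (c + 1) = c + 1 by omega]
    rw [PySem.List.pyRange_one_cons (by omega), show c - 1 + 1 = c by ring,
        PySem.List.pyRange_one_cons (by omega), show (c + 1 + 1 : Int) = (c + 1) + 1 by ring,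
        PySem.List.pyRange_one_singleton]
    symm; rw [List.filter_eq_self]
    intro a ha; simp at ha ⊢; rcases ha with rfl | rfl | rfl <;> omega
  by_cases h5 : c = 26
  · subst h5; decide
  by_cases h6 : c = 27
  · subst h6; decide
  · rw [PySem.List.pyRange_one_eq_nil (by omega)]
    symm; rw [List.filter_eq_nil_iff]
    intro a ha; simp at ha ⊢; rcases ha with rfl | rfl | rfl <;> omega

theorem pvBox_cons (c : Int) (rest : List Int) :
    pvBox (c :: rest) = (pvValid c).flatMap (fun v => (pvBox rest).map (fun t => v :: t)) := by
  rw [pvBox, pv_axis_range]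

theorem pvBox_nil : pvBox [] = [[]] := rfl

theorem pvValid_nodup (c : Int) : (pvValid c).Nodup := by
  refine List.Nodup.filter _ ?_
  simp [List.nodup_cons]; omega

theorem pvValid_mem {c v : Int} (h : v ∈ pvValid c) : 0 ≤ v ∧ v ≤ 26 := by
  simp [pvValid] at h; exact h.2

theorem pvBox_nodup (coords : List Int) : (pvBox coords).Nodup := by
  induction coords with
  | nil => simp [pvBox]
  | cons c rest ih =>
    rw [pvBox_cons]
    rw [List.nodup_flatMap]
    constructor
    · intro v _; exact ih.map (fun a b h => by injection h)
    · refine (pvValid_nodup c).imp ?_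
      intro a b hab t h1 h2
      rcases List.mem_map.1 h1 with ⟨u, _, rfl⟩
      rcases List.mem_map.1 h2 with ⟨u', _, he⟩
      injection he with he1 _
      exact hab he1.symm

theorem pvBox_mem_bounds {coords t : List Int} (h : t ∈ pvBox coords) :
    ∀ v ∈ t, 0 ≤ v ∧ v ≤ 26 := by
  induction coords generalizing t with
  | nil =>
    simp [pvBox] at h; subst h; intro v hv; cases hv
  | cons c rest ih =>
    rw [pvBox_cons] at h
    rcases List.mem_flatMap.1 h with ⟨a, ha, ht⟩
    rcases List.mem_map.1 ht with ⟨u, hu, rfl⟩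
    intro v hv
    rcases List.mem_cons.1 hv with rfl | hv
    · exact pvValid_mem ha
    · exact ih hu v hv

-- the box filtered at the center is exactly pvG
theorem pvBox_filter_eq_pvG (x y z w : Int) :
    (pvBox [x, y, z, w]).filter (fun t => t != [x, y, z, w]) = pvG x y z w := by
  simp only [pvBox_cons, pvBox_nil, List.map_flatMap, List.map_map, pv_filter_flatMap]
  unfold pvG
  refine List.flatMap_congr ?_; intro kx _
  refine List.flatMap_congr ?_; intro ky _
  refine List.flatMap_congr ?_; intro kz _
  refine List.flatMap_congr ?_; intro kw _
  by_cases h : ([kx, ky, kz, kw] : List Int) = [x, y, z, w] <;>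
    simp [Function.comp, List.filter, h]

-- ===== VERDICT (by name: the statement is the Claim_ definition above) =====
theorem giveNeightbors_spec : Claim_equal_giveNeightbors := by
  intro x y z w _
  show giveNeightbors x y z w = giveNeightbors_alt x y z w
  rw [pvA_eq_pvG, ← pvBox_filter_eq_pvG]
  unfold giveNeightbors_alt
  by_cases hin : ([x, y, z, w] : List Int).all (fun c => decide (0 ≤ c ∧ c ≤ 26)) = true
  · rw [if_pos hin]
    exact ((pvBox_nodup _).erase_eq_filter _).symm
  · rw [if_neg hin]
    rw [List.filter_eq_self]
    intro t ht
    have hb := pvBox_mem_bounds ht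
    simp only [bne_iff_ne, ne_eq]
    intro he; subst he
    apply hin
    simp only [List.all_eq_true]
    intro c hc; exact decide_eq_true (hb c hc)
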